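-- pv_equiv track=rewrite | github.com/tejoker/BDDM | scripts/benchmark_mcts.py | _status_line
-- ===== SOURCE A (Python) =====
-- def _status_line(stdout: str, stderr: str) -> str:
--     combined = (stdout + "\n" + stderr).splitlines()
--     for line in reversed(combined):
--         s = line.strip()
--         if s.startswith("[ok]") or s.startswith("[fail]"):
--             return s
--     for line in reversed(combined):
--         s = line.strip()
--         if s:
--             return s
--     return ""
-- ===== SOURCE B (Python) =====
-- def _status_line(stdout: str, stderr: str) -> str:
--     fallback = None
--     for line in reversed((stdout + "\n" + stderr).splitlines()):
--         s = line.strip()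
--         if s.startswith("[ok]") or s.startswith("[fail]"):
--             return s
--         if fallback is None and s:
--             fallback = s
--     return fallback if fallback is not None else ""
-- ===== Notes on version B (the rewrite author's own statement) =====
-- stated objective: simpler
-- what changed: Replaces A's two separate reversed scans with a single reversed pass that returns status lines immediately and records the first nonempty line seen (in reverse) as a fallback accumulator.
import Mathlib
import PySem

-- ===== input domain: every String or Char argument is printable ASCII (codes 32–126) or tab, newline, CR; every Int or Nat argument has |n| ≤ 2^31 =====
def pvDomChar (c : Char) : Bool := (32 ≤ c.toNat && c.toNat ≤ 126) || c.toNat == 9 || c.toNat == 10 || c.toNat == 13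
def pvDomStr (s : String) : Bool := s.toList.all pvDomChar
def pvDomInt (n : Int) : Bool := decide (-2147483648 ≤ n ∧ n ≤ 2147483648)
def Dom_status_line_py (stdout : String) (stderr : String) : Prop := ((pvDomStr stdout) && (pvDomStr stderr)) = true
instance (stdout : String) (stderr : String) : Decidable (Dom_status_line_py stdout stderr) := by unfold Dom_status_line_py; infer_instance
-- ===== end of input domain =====

-- B fuses A's two reversed scans into one reversed pass with a fallback accumulator (objective: simpler).

-- ===== PORT A =====
-- first reversed loop of A: return the first stripped line starting with "[ok]"/"[fail]"
def slFindStatus : List String → Option String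
  | [] => none
  | l :: t =>
      let s := PySem.Str.strip l
      if PySem.Str.startswith s "[ok]" || PySem.Str.startswith s "[fail]" then some s
      else slFindStatus t

-- second reversed loop of A: return the first nonempty stripped line
def slFindNonempty : List String → Option String
  | [] => none
  | l :: t =>
      let s := PySem.Str.strip l
      if s ≠ "" then some s else slFindNonempty t

def status_line_py (stdout : String) (stderr : String) : String :=
  let combined := PySem.Str.splitlines (stdout ++ "\n" ++ stderr)
  match slFindStatus combined.reverse with
  | some s => s
  | none =>
    match slFindNonempty combined.reverse with
    | some s => s
    | none => ""

-- ===== PORT B =====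
-- single reversed pass of B, carrying the fallback (first nonempty stripped line seen)
def slGo : List String → Option String → String
  | [], fb => fb.getD ""
  | l :: t, fb =>
      let s := PySem.Str.strip l
      if PySem.Str.startswith s "[ok]" || PySem.Str.startswith s "[fail]" then s
      else slGo t (if fb.isNone && s ≠ "" then some s else fb)

def status_line_py_alt (stdout : String) (stderr : String) : String :=
  slGo (PySem.Str.splitlines (stdout ++ "\n" ++ stderr)).reverse none

-- ===== PRECONDITION & SPEC =====
def Spec_status_line_py (stdout : String) (stderr : String) (out : String) : Prop := out = status_line_py_alt stdout stderr
instance (stdout : String) (stderr : String) (out : String) : Decidable (Spec_status_line_py stdout stderr out) := by unfold Spec_status_line_py; infer_instance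

-- ===== CLAIM (what is proved, stated in full; the proofs are below) =====
def Claim_equal_status_line_py : Prop := ∀ (stdout : String) (stderr : String), Dom_status_line_py stdout stderr → Spec_status_line_py stdout stderr (status_line_py stdout stderr)

-- ===== LEMMAS AND PROOFS =====

-- once the fallback is set, B only still looks for a status line
theorem slGo_some (t : List String) (x : String) :
    slGo t (some x) = (slFindStatus t).getD x := by
  induction t with
  | nil => rfl
  | cons l t ih =>
    simp only [slGo, slFindStatus]
    by_cases h1 : (PySem.Str.startswith (PySem.Str.strip l) "[ok]" ||
        PySem.Str.startswith (PySem.Str.strip l) "[fail]") = true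
    · rw [if_pos h1, if_pos h1]; rfl
    · rw [if_neg h1, if_neg h1,
        if_neg (by simp : ¬ ((some x).isNone && decide (PySem.Str.strip l ≠ "")) = true)]
      exact ih

-- B's single pass equals A's two sequential scans
theorem slGo_none (t : List String) :
    slGo t none =
      (match slFindStatus t with
       | some s => s
       | none =>
         match slFindNonempty t with
         | some s => s
         | none => "") := by
  induction t with
  | nil => rfl
  | cons l t ih =>
    simp only [slGo, slFindStatus, slFindNonempty]
    by_cases h1 : (PySem.Str.startswith (PySem.Str.strip l) "[ok]" ||
        PySem.Str.startswith (PySem.Str.strip l) "[fail]") = true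
    · rw [if_pos h1, if_pos h1]
    · rw [if_neg h1, if_neg h1]
      by_cases h2 : PySem.Str.strip l = ""
      · rw [if_neg (by simp [h2] : ¬ ((none : Option String).isNone
            && decide (PySem.Str.strip l ≠ "")) = true),
          if_neg (fun hc => hc h2)]
        exact ih
      · rw [if_pos (by simp [h2] : ((none : Option String).isNone
            && decide (PySem.Str.strip l ≠ "")) = true),
          if_pos h2, slGo_some]
        cases slFindStatus t <;> simp

-- ===== VERDICT (by name: the statement is the Claim_ definition above) =====
theorem status_line_py_spec : Claim_equal_status_line_py := by
  intro stdout stderr _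
  unfold Spec_status_line_py status_line_py status_line_py_alt
  exact (slGo_none _).symm
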